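-- pv_equiv track=rewrite | github.com/Mephisto08/ct-braun-gruppe-vww | main.py | generate_control_matrix
-- ===== SOURCE A (Python) =====
-- def gen_em(rows: int):
--     result = []
--     for i in range(rows):
--         result.append(bin(2**(rows-i-1))[2:].zfill(rows))
--     return result
--
-- def gen_transposed_matrix(m):
--     t_matrix = []
--     for i in range(len(m[0])):
--         pol_str = ""
--         for j in range(len(m)):
--             pol_str += m[j][i]
--
--         t_matrix.append(pol_str)
--
--     return t_matrix
--
-- def generate_control_matrix(gm):
--     g = gm.copy()
--     rowCount = len(g)
--
--     for i in range(rowCount):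
--         g[i] = g[i][rowCount:]
--
--     p_transposed = gen_transposed_matrix(g)
--
--     em = gen_em(len(p_transposed))
--
--     h = []
--     for i in range(len(p_transposed)):
--         h.append(p_transposed[i] + em[i])
--
--     km = gen_transposed_matrix(h)
--
--     return km
-- ===== SOURCE B (Python) =====
-- def generate_control_matrix(gm):
--     # Direct construction: the double transpose in A cancels, so the result is the
--     # parity columns of each generator row followed by a p x p identity block,
--     # generated by shifting the leading unit row (1 << (p - 1)) downwards.
--     n = len(gm)
--     p = len(gm[0]) - n
--     km = [''.join(row[n + j] for j in range(p)) for row in gm]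
--     unit = 1 << (p - 1)
--     for i in range(p):
--         km.append(bin(unit >> i)[2:].zfill(p))
--     return km
-- ===== Notes on version B (the rewrite author's own statement) =====
-- stated objective: simpler
-- what changed: Replaced the slice-transpose-append-transpose pipeline by a direct construction: the two transposes cancel, so B emits each row's parity columns followed by a p x p identity block, with no transpose helper at all.
import Mathlib
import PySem

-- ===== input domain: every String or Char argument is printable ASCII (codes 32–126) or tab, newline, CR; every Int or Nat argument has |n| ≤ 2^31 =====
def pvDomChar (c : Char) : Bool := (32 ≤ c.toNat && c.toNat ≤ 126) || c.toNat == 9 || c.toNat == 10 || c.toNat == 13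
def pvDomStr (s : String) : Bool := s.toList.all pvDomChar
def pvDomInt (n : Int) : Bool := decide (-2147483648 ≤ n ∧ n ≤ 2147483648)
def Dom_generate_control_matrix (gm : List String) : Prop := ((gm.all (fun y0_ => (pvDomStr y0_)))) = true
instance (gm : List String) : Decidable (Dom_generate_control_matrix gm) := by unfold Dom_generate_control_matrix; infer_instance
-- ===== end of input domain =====

-- B replaces A's slice/transpose/append/transpose pipeline by the direct construction
-- (parity part of each row, then an identity block); objective: simpler, same cost.

-- ===== PORT A =====
-- bin(2**(rows-i-1))[2:].zfill(rows); the loop appending to `result` is the map over range(rows).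
-- `rows - i - 1` is Nat subtraction, equal to Python's since i < rows.
def gen_em (rows : Nat) : List String :=
  (List.range rows).map (fun i =>
    PySem.Str.zfill (PySem.Str.slice (PySem.Int.pyBin ((2:Int) ^ (rows - i - 1))) (some 2) none) (rows : Int))

-- m[0] → PySem.List.pyGetD m 0 "" (Python raises on empty m: excluded by Pre_);
-- the inner loop over j in range(len(m)) reading m[j][i] is the map over m; the character
-- m[j][i] is row.toList.getD i ' ' — exact for i < len(row) (out of range Python raises: excluded by Pre_).
def gen_transposed_matrix (m : List String) : List String :=
  (List.range (PySem.List.pyGetD m 0 "").toList.length).map (fun i =>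
    String.ofList (m.map (fun row => row.toList.getD i ' ')))

def generate_control_matrix (gm : List String) : List String :=
  let rowCount := gm.length
  -- for i in range(rowCount): g[i] = g[i][rowCount:]
  let g := gm.map (fun row => PySem.Str.slice row (some (rowCount : Int)) none)
  let p_transposed := gen_transposed_matrix g
  let em := gen_em p_transposed.length
  -- h.append(p_transposed[i] + em[i])
  let h := (List.range p_transposed.length).map (fun (i : Nat) =>
    String.ofList ((PySem.List.pyGetD p_transposed (i : Int) "").toList ++ (PySem.List.pyGetD em (i : Int) "").toList))
  gen_transposed_matrix h

-- ===== PORT B =====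
-- row[n + j] → PySem.List.pyGetD (exact for indices in range; outside Pre_, where Python B
-- raises IndexError, nothing is claimed — except p ≤ 0, where both sides have an empty range).
def generate_control_matrix_alt (gm : List String) : List String :=
  let n := gm.length
  let p : Int := ((PySem.List.pyGetD gm 0 "").toList.length : Int) - n
  gm.map (fun row => String.ofList ((PySem.List.pyRange 0 p 1).map (fun j =>
      PySem.List.pyGetD row.toList ((n : Int) + j) ' ')))
    ++ (let unit : Nat := 2 ^ (p - 1).toNat;   -- 1 << (p - 1); for p ≤ 0 Python raises ValueError (outside Pre_)
      (PySem.List.pyRange 0 p 1).map (fun i =>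
        PySem.Str.zfill (PySem.Str.slice (PySem.Int.pyBin ((Nat.shiftRight unit i.toNat : Nat) : Int)) (some 2) none) p))

-- ===== PRECONDITION & SPEC =====
-- Pre_ is exactly the set on which Python A returns normally: a nonempty matrix whose first row is
-- strictly longer than the row count (so the parity block is nonempty), every row at least as long
-- as the first; outside it A raises IndexError.
def Pre_generate_control_matrix (gm : List String) : Prop :=
  gm ≠ [] ∧ gm.length < (gm.headD "").toList.length ∧
    ∀ s ∈ gm, (gm.headD "").toList.length ≤ s.toList.length
instance (gm : List String) : Decidable (Pre_generate_control_matrix gm) := by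
  unfold Pre_generate_control_matrix; infer_instance

def pvWitness_generate_control_matrix : List String := ["1011", "0110"]


def Spec_generate_control_matrix (gm : List String) (out : List String) : Prop := out = generate_control_matrix_alt gm
instance (gm : List String) (out : List String) : Decidable (Spec_generate_control_matrix gm out) := by unfold Spec_generate_control_matrix; infer_instance

-- ===== CLAIM (what is proved, stated in full; the proofs are below) =====
def Claim_equal_generate_control_matrix : Prop := ∀ (gm : List String), Dom_generate_control_matrix gm → Pre_generate_control_matrix gm → Spec_generate_control_matrix gm (generate_control_matrix gm)

-- ===== LEMMAS AND PROOFS =====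

-- the i-th row of the p × p identity block
def pvIdRow (p i : Nat) : List Char := List.replicate i '0' ++ '1' :: List.replicate (p - i - 1) '0'

theorem pvIdRow_length {p i : Nat} (h : i < p) : (pvIdRow p i).length = p := by
  simp [pvIdRow]; omega

theorem pvIdRow_getElem {p i j : Nat} (hi : i < p) (_hj : j < p) (hj' : j < (pvIdRow p i).length) :
    (pvIdRow p i)[j] = if j = i then '1' else '0' := by
  unfold pvIdRow
  rcases lt_trichotomy j i with hlt | rfl | hgt
  · rw [List.getElem_append_left (by simpa using hlt)]
    simp [List.getElem_replicate, Nat.ne_of_lt hlt]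
  · have hl : (List.replicate j '0').length ≤ j := by simp
    rw [List.getElem_append_right hl]
    simp
  · have hl : (List.replicate i '0').length ≤ j := by simp; omega
    rw [List.getElem_append_right hl]
    have hidx : j - (List.replicate i '0').length = (j - i - 1) + 1 := by simp; omega
    simp only [hidx, List.getElem_cons_succ, List.getElem_replicate]
    rw [if_neg (by omega)]

theorem pvToDigitsCore_pow (k : Nat) : ∀ (fuel : Nat) (acc : List Char), 2 ^ k < fuel →
    Nat.toDigitsCore 2 fuel (2 ^ k) acc = '1' :: (List.replicate k '0' ++ acc) := by
  induction k with
  | zero =>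
    intro fuel acc h
    match fuel, h with
    | fuel + 1, _ => simp [Nat.toDigitsCore, Nat.digitChar]
  | succ k ih =>
    intro fuel acc h
    match fuel, h with
    | fuel + 1, h =>
      have h1 : 2 ^ (k + 1) % 2 = 0 := by rw [pow_succ]; simp
      have h2 : 2 ^ (k + 1) / 2 = 2 ^ k := by rw [pow_succ]; exact Nat.mul_div_cancel _ (by norm_num)
      have hne : 2 ^ (k + 1) / 2 ≠ 0 := by rw [h2]; positivity
      simp only [Nat.toDigitsCore, h1, h2, Nat.digitChar, if_true]
      rw [ih fuel _ (by have := Nat.pow_lt_pow_succ (a := 2) (by norm_num) (n := k); omega)]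
      simp [List.replicate_succ']

theorem pvToDigits_pow (k : Nat) : Nat.toDigits 2 (2 ^ k) = '1' :: List.replicate k '0' := by
  have := pvToDigitsCore_pow k (2 ^ k + 1) [] (Nat.lt_succ_self _)
  simpa [Nat.toDigits] using this

theorem pvBinChars (e : Nat) :
    (PySem.Str.slice (PySem.Int.pyBin ((2:Int) ^ e)) (some 2) none).toList = '1' :: List.replicate e '0' := by
  rw [PySem.Str.toList_slice]
  simp only [PySem.Chars.slice]
  rw [PySem.List.slice_from _ (by norm_num), PySem.Int.toList_pyBin]
  have hnn : ¬ ((2:Int) ^ e < 0) := by norm_num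
  simp only [PySem.Int.toBinChars0b, if_neg hnn]
  have : ((2:Int) ^ e).toNat = 2 ^ e := by
    rw [← Nat.cast_ofNat (n := 2), ← Nat.cast_pow]; exact Int.toNat_natCast _
  rw [this, pvToDigits_pow]
  rfl

theorem pvEmRow (p i : Nat) (hip : i < p) :
    PySem.Str.zfill (PySem.Str.slice (PySem.Int.pyBin ((2:Int) ^ (p - i - 1))) (some 2) none) (p : Int)
      = String.ofList (pvIdRow p i) := by
  rw [← String.toList_inj, PySem.Str.toList_zfill, pvBinChars, String.toList_ofList]
  simp only [PySem.Chars.zfill]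
  have hlen : ('1' :: List.replicate (p - i - 1) '0').length = p - i := by simp; omega
  by_cases h0 : i = 0
  · subst h0
    rw [if_pos (by rw [hlen]; omega)]
    simp [pvIdRow]
  · rw [if_neg (by rw [hlen]; omega)]
    have hns : ¬ ('1' = '+' ∨ '1' = '-') := by decide
    simp only [if_neg hns, hlen, pvIdRow]
    congr 1
    · congr 1
      rw [Int.toNat_natCast]
      omega

theorem gen_em_eq (p : Nat) : gen_em p = (List.range p).map (fun i => String.ofList (pvIdRow p i)) := by
  unfold gen_em
  apply List.map_congr_left
  intro i hi
  exact pvEmRow p i (List.mem_range.mp hi)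

-- (range k).map (getD · d) of a long-enough list is take k
theorem pvMap_range_getD {α : Type} (l : List α) (d : α) (k : Nat) (h : k ≤ l.length) :
    (List.range k).map (fun i => l.getD i d) = l.take k := by
  apply List.ext_getElem
  · simp; omega
  · intro j h1 h2
    have hjk : j < k := by simpa using h1
    have hj : j < l.length := by omega
    simp [List.getD_eq_getElem?_getD, List.getElem?_eq_getElem hj]

theorem pvMap_range_if (p j : Nat) (hj : j < p) :
    (List.range p).map (fun i => if j = i then '1' else '0') = pvIdRow p j := by
  apply List.ext_getElem
  · simp [pvIdRow_length hj]
  · intro i h1 h2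
    have hip : i < p := by simpa using h1
    simp only [List.getElem_map, List.getElem_range]
    rw [pvIdRow_getElem hj hip h2]
    by_cases h : i = j
    · simp [h]
    · simp [h, Ne.symm h]

theorem pvPyGetD_map_range0 (f : Nat → String) (p : Nat) (hp : 0 < p) :
    PySem.List.pyGetD ((List.range p).map f) 0 "" = f 0 := by
  obtain ⟨q, rfl⟩ := Nat.exists_eq_add_of_lt hp
  rw [Nat.zero_add, List.range_succ_eq_map]
  simp only [List.map_cons, PySem.List.pyGetD_zero_cons]

set_option maxHeartbeats 2000000 in
theorem pvMap_range_getD_add {α : Type} (l : List α) (d : α) (n k : Nat) (h : n + k ≤ l.length) :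
    (List.range k).map (fun i => l.getD (n + i) d) = (l.drop n).take k := by
  apply List.ext_getElem
  · simp; omega
  · intro j h1 h2
    have hjk : j < k := by simpa using h1
    simp only [List.getElem_map, List.getElem_range, List.getElem_take, List.getElem_drop]
    rw [List.getD_eq_getElem?_getD, List.getElem?_eq_getElem (by omega)]
    rfl

theorem generate_control_matrix_eq (gm : List String) (hpre : Pre_generate_control_matrix gm) :
    generate_control_matrix gm = generate_control_matrix_alt gm := by
  obtain ⟨hne, hLn, hrows⟩ := hpre
  cases gm with
  | nil => exact absurd rfl hne
  | cons s0 rest =>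
  set n := (s0 :: rest).length with hn
  set L := s0.toList.length with hL
  have hLn' : n < L := by simpa using hLn
  set p := L - n with hp
  have hp0 : 0 < p := by omega
  have hrows' : ∀ s ∈ (s0 :: rest), L ≤ s.toList.length := by
    intro s hs
    simpa using hrows s hs
  -- s[rowCount:] is drop rowCount
  have hslice : ∀ (row : String), (PySem.Str.slice row (some (n : Int)) none).toList = row.toList.drop n := by
    intro row
    rw [PySem.Str.toList_slice]
    simp only [PySem.Chars.slice]
    rw [PySem.List.slice_from _ (by positivity)]
    simp
  set g := (s0 :: rest).map (fun row => PySem.Str.slice row (some (n : Int)) none) with hg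
  have hglen : g.length = n := by rw [hg, List.length_map]
  have hgc : ∀ c (hc : c < n), (g[c]'(by omega)).toList
      = ((s0 :: rest)[c]'(by omega)).toList.drop n := by
    intro c hc
    simp only [hg, List.getElem_map]
    exact hslice _
  have hgclen : ∀ c (hc : c < n), p ≤ (g[c]'(by omega)).toList.length := by
    intro c hc
    rw [hgc c hc, List.length_drop]
    have := hrows' _ (List.getElem_mem (l := s0 :: rest) (by omega))
    omega
  -- the head of g
  have hg0len : (PySem.List.pyGetD g 0 "").toList.length = p := by
    rw [hg]
    simp only [List.map_cons, PySem.List.pyGetD_zero_cons]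
    rw [hslice, List.length_drop, ← hL, ← hp]
  -- the transposed parity block
  have hpt : gen_transposed_matrix g
      = (List.range p).map (fun i => String.ofList (g.map (fun row => row.toList.getD i ' '))) := by
    unfold gen_transposed_matrix
    rw [hg0len]
  -- A's value, in closed form
  have hA : generate_control_matrix (s0 :: rest)
      = (List.range (n + p)).map (fun c => String.ofList ((List.range p).map (fun i =>
          ((g.map (fun row => row.toList.getD i ' ')) ++ pvIdRow p i).getD c ' '))) := by
    simp only [generate_control_matrix]
    rw [← hn, ← hg, hpt]
    rw [show ((List.range p).map (fun i => String.ofList (g.map (fun row => row.toList.getD i ' ')))).length = p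
        from by rw [List.length_map, List.length_range]]
    rw [gen_em_eq]
    have hh : (List.range p).map (fun (i : Nat) => String.ofList
          ((PySem.List.pyGetD ((List.range p).map (fun i => String.ofList (g.map (fun row => row.toList.getD i ' ')))) (i : Int) "").toList
            ++ (PySem.List.pyGetD ((List.range p).map (fun j => String.ofList (pvIdRow p j))) (i : Int) "").toList))
        = (List.range p).map (fun i => String.ofList
          ((g.map (fun row => row.toList.getD i ' ')) ++ pvIdRow p i)) := by
      apply List.map_congr_left
      intro i hi
      have hip : i < p := List.mem_range.mp hi
      rw [PySem.List.pyGetD_natCast, PySem.List.pyGetD_natCast]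
      rw [List.getD_eq_getElem _ _ (by simpa), List.getD_eq_getElem _ _ (by simpa)]
      simp
    rw [hh]
    unfold gen_transposed_matrix
    rw [pvPyGetD_map_range0 _ _ hp0]
    have hlen0 : (String.ofList ((g.map (fun row => row.toList.getD 0 ' ')) ++ pvIdRow p 0)).toList.length
        = n + p := by
      rw [String.toList_ofList, List.length_append, List.length_map, hglen, pvIdRow_length hp0]
    rw [hlen0]
    apply List.map_congr_left
    intro c _
    refine congrArg String.ofList ?_
    rw [List.map_map]
    apply List.map_congr_left
    intro i _
    simp
  rw [hA]
  have hL0 : (PySem.List.pyGetD (s0 :: rest) 0 "").toList.length = L := by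
    rw [PySem.List.pyGetD_zero_cons, ← hL]
  have haltlen : (generate_control_matrix_alt (s0 :: rest)).length = n + p := by
    simp only [generate_control_matrix_alt]
    rw [List.length_append, List.length_map, List.length_map, PySem.List.length_pyRange_one, hL0, ← hn]
    omega
  apply List.ext_getElem
  · rw [List.length_map, List.length_range, haltlen]
  · intro c hc1 hc2
    have hcnp : c < n + p := by
      rw [List.length_map, List.length_range] at hc1
      exact hc1
    simp only [List.getElem_map, List.getElem_range]
    simp only [generate_control_matrix_alt]
    by_cases hcn : c < n
    · -- the parity columns: both sides are row c of gm, chars rowCount .. rowCount+p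
      rw [List.getElem_append_left (by rw [List.length_map, ← hn]; omega)]
      rw [List.getElem_map]
      rw [← String.toList_inj, String.toList_ofList, String.toList_ofList]
      have hinner : ∀ i ∈ List.range p,
          ((g.map (fun row => row.toList.getD i ' ')) ++ pvIdRow p i).getD c ' '
          = (g[c]'(by omega)).toList.getD i ' ' := by
        intro i _
        rw [List.getD_append _ _ _ c (by rw [List.length_map, hglen]; omega)]
        rw [List.getD_eq_getElem _ _ (by rw [List.length_map, hglen]; omega)]
        simp
      rw [List.map_congr_left hinner]
      rw [pvMap_range_getD _ _ _ (hgclen c hcn)]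
      rw [hgc c hcn]
      -- B's column picking for row c
      rw [PySem.List.pyRange_one, List.map_map]
      rw [show ((((PySem.List.pyGetD (s0 :: rest) 0 "").toList.length : Int) - ((s0 :: rest).length : Int)) - 0).toNat
          = p from by rw [hL0, ← hn]; omega]
      have hcong : ∀ k ∈ List.range p,
          (((fun j => PySem.List.pyGetD ((s0 :: rest)[c]'(by omega)).toList
              (((s0 :: rest).length : Int) + j) ' ') ∘ (fun (k : Nat) => (0 : Int) + ↑k)) k)
          = ((s0 :: rest)[c]'(by omega)).toList.getD (n + k) ' ' := by
        intro k _
        simp only [Function.comp]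
        rw [show ((s0 :: rest).length : Int) + ((0 : Int) + (k : Nat)) = (((n + k : Nat)) : Int) from by
          rw [← hn]; push_cast; ring]
        rw [PySem.List.pyGetD_natCast]
      rw [List.map_congr_left hcong]
      rw [pvMap_range_getD_add _ _ _ _ (by
        have := hrows' _ (List.getElem_mem (l := s0 :: rest) (by omega))
        omega)]
    · -- the identity columns
      have hj : c - n < p := by omega
      rw [List.getElem_append_right (by rw [List.length_map, ← hn]; omega)]
      rw [List.getElem_map]
      rw [PySem.List.getElem_pyRange_one]
      rw [List.length_map, ← hn]
      rw [show (((PySem.List.pyGetD (s0 :: rest) 0 "").toList.length : Int) - ((n : Nat) : Int)) = (p : Int)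
          from by rw [hL0]; omega]
      rw [show (Nat.shiftRight (2 ^ (((p : Int) - 1).toNat)) (((0 : Int) + ((c - n : Nat) : Int)).toNat) : Int)
          = (2 : Int) ^ (p - (c - n) - 1) from by
        rw [show (((p : Int) - 1)).toNat = p - 1 from by omega,
          show (((0 : Int) + ((c - n : Nat) : Int))).toNat = c - n from by omega,
          show Nat.shiftRight (2 ^ (p - 1)) (c - n) = 2 ^ (p - 1) / 2 ^ (c - n) from
            Nat.shiftRight_eq_div_pow _ _,
          Nat.pow_div (by omega) (by norm_num),
          show p - 1 - (c - n) = p - (c - n) - 1 from by omega]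
        push_cast
        ring]
      rw [pvEmRow p (c - n) hj]
      rw [← String.toList_inj, String.toList_ofList, String.toList_ofList]
      have hinner : ∀ i ∈ List.range p,
          ((g.map (fun row => row.toList.getD i ' ')) ++ pvIdRow p i).getD c ' '
          = (if (c - n) = i then '1' else '0') := by
        intro i hi
        have hip : i < p := List.mem_range.mp hi
        rw [List.getD_append_right _ _ _ c (by rw [List.length_map, hglen]; omega)]
        rw [List.getD_eq_getElem _ _ (by rw [pvIdRow_length hip, List.length_map, hglen]; omega)]
        have harg : c - (g.map (fun row => row.toList.getD i ' ')).length = c - n := by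
          rw [List.length_map, hglen]
        simp only [harg]
        exact pvIdRow_getElem hip hj _
      rw [List.map_congr_left hinner]
      rw [pvMap_range_if p (c - n) hj]

-- ===== VERDICT (by name: the statement is the Claim_ definition above) =====
theorem generate_control_matrix_spec : Claim_equal_generate_control_matrix := by
  intro gm _ hpre
  exact generate_control_matrix_eq gm hpre
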